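-- pv_equiv track=rewrite | github.com/yariksbachok/Bot_coffee | logic.py | get_opt
-- ===== SOURCE A (Python) =====
-- def get_opt(weight, n):
--     int_weight = ''
--     number = 0
--     for i in weight:
--         if i.isdigit():
--             int_weight += i
--             number+=1
--     if number == 1:
--         int_weight = int_weight+'000'
--
--     all = n * int(int_weight)
--     text_opt = ''
--     if all < 2000:
--         new_all = 2000 - all
--         if new_all == 1000 and int(int_weight) != 250:
--             text_opt = 'Возьмите еще один и цена будет оптовая'
--
--         else:
--             number = 0
--             for i in range(10):
--                 all+=250
--                 number += 1
--                 if all >= 2000: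
--                     text_opt = f'Возьмите еще {number} и цена будет оптовая'
--                     break
--     else:
--         text_opt = 'У вас цена оптовая'
--
--
--     return text_opt
-- ===== SOURCE B (Python) =====
-- def get_opt(weight, n):
--     digits = ''.join(c for c in weight if c.isdigit())
--     if len(digits) == 1:
--         digits += '000'
--     w = int(digits)
--     total = n * w
--     if total >= 2000:
--         return 'У вас цена оптовая'
--     if total == 1000 and w != 250:
--         return 'Возьмите еще один и цена будет оптовая'
--     k = (2000 - total + 249) // 250
--     if k <= 10:
--         return f'Возьмите еще {k} и цена будет оптовая'
--     return ''
-- ===== Notes on version B (the rewrite author's own statement) =====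
-- stated objective: simpler
-- what changed: Replaces the range(10) increment-and-test loop with closed-form ceiling division k = (2000 - total + 249)//250 (message iff k <= 10), and restructures the function as an early-return chain with comprehension-based digit extraction.
import Mathlib
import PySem

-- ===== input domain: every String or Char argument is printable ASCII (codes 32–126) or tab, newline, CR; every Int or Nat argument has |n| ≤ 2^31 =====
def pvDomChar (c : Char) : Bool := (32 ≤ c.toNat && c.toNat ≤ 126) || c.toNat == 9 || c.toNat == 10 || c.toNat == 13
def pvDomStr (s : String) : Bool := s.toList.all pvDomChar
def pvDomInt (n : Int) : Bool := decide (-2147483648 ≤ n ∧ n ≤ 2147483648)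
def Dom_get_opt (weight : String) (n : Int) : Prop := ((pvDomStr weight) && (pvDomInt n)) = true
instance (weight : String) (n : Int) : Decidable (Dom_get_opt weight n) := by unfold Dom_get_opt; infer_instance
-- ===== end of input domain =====

-- B replaces A's range(10) increment loop by closed-form ceiling division (simpler early-return chain).

-- ===== PORT A =====
-- the `for i in range(10)` loop: state (all, number); returns '' if the loop runs out
def getOptLoop : Nat → Int → Int → String
  | 0, _, _ => ""
  | fuel+1, all, number =>
      let all' := all + 250
      let number' := number + 1
      if 2000 ≤ all' then
        "Возьмите еще " ++ PySem.Int.toStr number' ++ " и цена будет оптовая"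
      else getOptLoop fuel all' number'

def get_opt (weight : String) (n : Int) : String :=
  -- digit-collecting loop: state (int_weight as chars, number)
  let st := weight.toList.foldl
      (fun (p : List Char × Int) i =>
        if PySem.Chars.isdigit i then (p.1 ++ [i], p.2 + 1) else p) ([], 0)
  let iw := if st.2 == 1 then st.1 ++ ['0', '0', '0'] else st.1
  match PySem.Int.ofChars? iw with
  | none => ""   -- int('') raises ValueError; excluded by Pre_get_opt
  | some w =>
    let all := n * w
    if all < 2000 then
      if 2000 - all == 1000 && !(w == 250) then
        "Возьмите еще один и цена будет оптовая"
      else getOptLoop 10 all 0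
    else "У вас цена оптовая"

-- ===== PORT B =====
def get_opt_alt (weight : String) (n : Int) : String :=
  let ds := weight.toList.filter PySem.Chars.isdigit
  let ds := if ds.length == 1 then ds ++ ['0', '0', '0'] else ds
  match PySem.Int.ofChars? ds with
  | none => ""   -- int('') raises ValueError; excluded by Pre_get_opt
  | some w =>
    let total := n * w
    if 2000 ≤ total then "У вас цена оптовая"
    else if total == 1000 && !(w == 250) then
      "Возьмите еще один и цена будет оптовая"
    else
      let k := PySem.Int.floordiv (2000 - total + 249) 250
      if k ≤ 10 then "Возьмите еще " ++ PySem.Int.toStr k ++ " и цена будет оптовая"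
      else ""

-- ===== PRECONDITION & SPEC =====
-- Pre_ excludes weights containing no digit character: there Python's int('') raises ValueError (both A and B raise).
def Pre_get_opt (weight : String) (n : Int) : Prop :=
  weight.toList.any PySem.Chars.isdigit = true
instance (weight : String) (n : Int) : Decidable (Pre_get_opt weight n) := by
  unfold Pre_get_opt; infer_instance
def pvWitness_get_opt : String × Int := ("250", 4)

def Spec_get_opt (weight : String) (n : Int) (out : String) : Prop := out = get_opt_alt weight n
instance (weight : String) (n : Int) (out : String) : Decidable (Spec_get_opt weight n out) := by unfold Spec_get_opt; infer_instance

-- ===== CLAIM (what is proved, stated in full; the proofs are below) =====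
def Claim_equal_get_opt : Prop := ∀ (weight : String) (n : Int), Dom_get_opt weight n → Pre_get_opt weight n → Spec_get_opt weight n (get_opt weight n)

-- ===== LEMMAS AND PROOFS =====

-- A's digit fold computes the filtered digit list and its length
theorem pv_fold_eq (l : List Char) (acc : List Char) (m : Int) :
    l.foldl (fun (p : List Char × Int) i =>
        if PySem.Chars.isdigit i then (p.1 ++ [i], p.2 + 1) else p) (acc, m)
      = (acc ++ l.filter PySem.Chars.isdigit,
         m + ((l.filter PySem.Chars.isdigit).length : Int)) := by
  induction l generalizing acc m with
  | nil => simp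
  | cons c t ih =>
    by_cases h : PySem.Chars.isdigit c <;> simp [List.foldl, h, ih] <;> omega

-- the range(10) loop in closed form (ceiling division)
theorem pv_loop_eq (fuel : Nat) (all number : Int) (h : all < 2000) :
    getOptLoop fuel all number =
      (if PySem.Int.floordiv (2000 - all + 249) 250 ≤ (fuel : Int)
       then "Возьмите еще "
            ++ PySem.Int.toStr (number + PySem.Int.floordiv (2000 - all + 249) 250)
            ++ " и цена будет оптовая"
       else "") := by
  induction fuel generalizing all number with
  | zero =>
    rw [PySem.Int.floordiv_eq_ediv_of_pos (by norm_num : (0:Int) < 250)]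
    rw [if_neg (by omega : ¬ ((2000 - all + 249) / 250 ≤ ((0 : Nat) : Int)))]
    rfl
  | succ f ih =>
    rw [show getOptLoop (f + 1) all number
          = (if 2000 ≤ all + 250 then
               "Возьмите еще " ++ PySem.Int.toStr (number + 1) ++ " и цена будет оптовая"
             else getOptLoop f (all + 250) (number + 1)) from rfl]
    rw [PySem.Int.floordiv_eq_ediv_of_pos (by norm_num : (0:Int) < 250)]
    by_cases h2 : 2000 ≤ all + 250
    · rw [if_pos h2,
          if_pos (by omega : (2000 - all + 249) / 250 ≤ ((f + 1 : Nat) : Int)),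
          show number + (2000 - all + 249) / 250 = number + 1 from by omega]
    · rw [if_neg h2, ih (all + 250) (number + 1) (by omega)]
      rw [PySem.Int.floordiv_eq_ediv_of_pos (by norm_num : (0:Int) < 250)]
      have hiff : ((2000 - (all + 250) + 249) / 250 ≤ (f : Int)) ↔
          ((2000 - all + 249) / 250 ≤ ((f + 1 : Nat) : Int)) := by omega
      by_cases hc : (2000 - (all + 250) + 249) / 250 ≤ (f : Int)
      · rw [if_pos hc, if_pos (hiff.mp hc),
            show number + 1 + (2000 - (all + 250) + 249) / 250
               = number + (2000 - all + 249) / 250 from by omega]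
      · rw [if_neg hc, if_neg (fun hx => hc (hiff.mpr hx))]

-- ===== VERDICT (by name: the statement is the Claim_ definition above) =====
theorem get_opt_spec : Claim_equal_get_opt := by
  intro weight n _ _
  show get_opt weight n = get_opt_alt weight n
  unfold get_opt get_opt_alt
  rw [pv_fold_eq]
  simp only [List.nil_append]
  set ds0 := weight.toList.filter PySem.Chars.isdigit with hds0
  have hlen : ((0 : Int) + ((ds0.length : Nat) : Int) == 1) = (ds0.length == 1) := by
    cases h : ds0.length == 1
    · simp_all
    · simp_all
  rw [hlen]
  cases hcase : PySem.Int.ofChars? (if ds0.length == 1 then ds0 ++ ['0','0','0'] else ds0) with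
  | none => rfl
  | some w =>
    simp only []
    by_cases hlt : n * w < 2000
    · rw [if_pos hlt, if_neg (by omega : ¬ ((2000 : Int) ≤ n * w))]
      have hsc : (2000 - n * w == (1000 : Int)) = (n * w == (1000 : Int)) := by
        by_cases h1 : n * w = (1000 : Int) <;> simp [h1] <;> omega
      rw [hsc]
      cases hb : (n * w == (1000 : Int) && !(w == (250 : Int)))
      · rw [if_neg (by simp), if_neg (by simp)]
        rw [pv_loop_eq 10 (n * w) 0 hlt, Int.zero_add]
        norm_num
      · rfl
    · rw [if_neg hlt, if_pos (by omega : (2000 : Int) ≤ n * w)]
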